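-- pv_equiv track=rewrite | github.com/quantumquackerydivinearts-cell/DjinnOS-Shyagzun | qqva/aster_colors.py | _split_compound_token
-- ===== SOURCE A (Python) =====
-- _ASTER_TOKEN_RGB: dict[str, tuple[int, int, int]] = {
--     "ru": (198, 40, 40),
--     "ot": (239, 108, 0),
--     "el": (249, 168, 37),
--     "ki": (46, 125, 50),
--     "fu": (21, 101, 192),
--     "ka": (40, 53, 147),
--     "ae": (106, 27, 154),
--     "ha": (255, 255, 255),
--     "ga": (17, 17, 17),
--     "na": (158, 158, 158),
--     "ung": (78, 52, 46),
--     "wu": (207, 216, 220),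
-- }
--
-- def _normalize_token(value: str) -> str:
--     return "".join(ch.lower() for ch in value if ch.isalnum())
--
-- def _split_compound_token(raw: str) -> list[str]:
--     normalized = _normalize_token(raw)
--     if not normalized:
--         return []
--     candidates = sorted(_ASTER_TOKEN_RGB.keys(), key=lambda item: (-len(item), item))
--     parts: list[str] = []
--     offset = 0
--     while offset < len(normalized):
--         matched = None
--         for candidate in candidates:
--             if normalized.startswith(candidate, offset):
--                 matched = candidate
--                 break
--         if matched is None:
--             return []
--         parts.append(matched)
--         offset += len(matched)
--     return parts
-- ===== SOURCE B (Python) =====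
-- # Alternative: optimistic single scan that skips unmatched characters, then a
-- # join-equality guard reproduces the fail-to-segment behaviour (any skip leaves
-- # a length gap, so the joined parts can no longer equal the normalized string).
-- _TOKENS = ("ung", "ae", "el", "fu", "ga", "ha", "ka", "ki", "na", "ot", "ru", "wu")
--
--
-- def _normalize_token(value: str) -> str:
--     return "".join(ch.lower() for ch in value if ch.isalnum())
--
--
-- def _split_compound_token(raw: str) -> list[str]:
--     normalized = _normalize_token(raw)
--     parts: list[str] = []
--     i = 0
--     n = len(normalized)
--     while i < n:
--         for tok in _TOKENS:
--             if normalized.startswith(tok, i):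
--                 parts.append(tok)
--                 i += len(tok)
--                 break
--         else:
--             i += 1
--     return parts if "".join(parts) == normalized else []
-- ===== Notes on version B (the rewrite author's own statement) =====
-- stated objective: alternative
-- what changed: A greedily consumes tokens and aborts with [] the moment no candidate (re-sorted on every call) matches at the current offset; B scans optimistically over a fixed longest-first token tuple, skipping unmatched characters, and decides success afterwards by a single join-equality guard instead of in-loop failure handling.
import Mathlib
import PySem

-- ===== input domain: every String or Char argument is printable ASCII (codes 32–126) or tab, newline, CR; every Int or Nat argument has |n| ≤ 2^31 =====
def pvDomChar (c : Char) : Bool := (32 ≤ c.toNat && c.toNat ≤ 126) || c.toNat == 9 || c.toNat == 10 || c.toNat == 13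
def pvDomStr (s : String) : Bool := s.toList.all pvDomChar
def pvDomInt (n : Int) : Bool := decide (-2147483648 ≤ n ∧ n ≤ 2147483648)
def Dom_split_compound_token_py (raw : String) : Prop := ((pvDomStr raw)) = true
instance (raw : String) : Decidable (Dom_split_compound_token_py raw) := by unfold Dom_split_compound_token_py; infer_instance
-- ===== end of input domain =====

-- B replaces A's fail-fast greedy consumer (with its per-call re-sort of the keys) by an
-- optimistic skip-on-miss scan over a fixed longest-first token tuple plus one final
-- join-equality guard; alternative decomposition, same asymptotic cost.

-- ===== PORT A =====
-- _normalize_token: "".join(ch.lower() for ch in value if ch.isalnum()), kept as List Char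
def normalizeTok (value : String) : List Char :=
  (value.toList.filter PySem.Chars.isalnum).map PySem.Chars.lowerChar

-- _ASTER_TOKEN_RGB keys in dict insertion order
def asterKeys : List String :=
  ["ru", "ot", "el", "ki", "fu", "ka", "ae", "ha", "ga", "na", "ung", "wu"]

-- candidates = sorted(keys, key=lambda item: (-len(item), item))
def candidatesA : List String :=
  PySem.List.sorted2 asterKeys (fun item => -(PySem.Str.len item)) (fun item => item) false

-- needed by aLoop's termination argument
theorem candidatesA_pos : ∀ x ∈ candidatesA, 0 < x.toList.length := by
  have h : candidatesA = ["ung", "ae", "el", "fu", "ga", "ha", "ka", "ki", "na", "ot", "ru", "wu"] := by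
    simp [candidatesA, asterKeys, PySem.List.sorted2, PySem.List.insertBy]
    rfl
  rw [h]; decide

-- the while-loop over offsets, state = (remaining suffix, parts); inner for/break = find?
def aLoop (rem : List Char) (parts : List String) : List String :=
  if h : rem.length = 0 then parts
  else
    match hm : candidatesA.find? (fun c => PySem.Chars.startswith rem c.toList) with
    | none => []
    | some m => aLoop (rem.drop m.toList.length) (parts ++ [m])
termination_by rem.length
decreasing_by
  have hmem := List.mem_of_find?_eq_some hm
  have := candidatesA_pos _ hmem
  simp only [List.length_drop]
  omega

def split_compound_token_py (raw : String) : List String :=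
  let normalized := normalizeTok raw
  if normalized.length = 0 then [] else aLoop normalized []

-- ===== PORT B =====
-- _TOKENS = ("ung", "ae", "el", "fu", "ga", "ha", "ka", "ki", "na", "ot", "ru", "wu")
def tokensB : List String :=
  ["ung", "ae", "el", "fu", "ga", "ha", "ka", "ki", "na", "ot", "ru", "wu"]

-- needed by bScan's termination argument
theorem tokensB_pos : ∀ x ∈ tokensB, 0 < x.toList.length := by decide

-- B's while-loop: take the matching token and advance by its length, else skip one char
def bScan (rem : List Char) : List String :=
  if h : rem.length = 0 then []
  else
    match hm : tokensB.find? (fun t => PySem.Chars.startswith rem t.toList) with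
    | some t => t :: bScan (rem.drop t.toList.length)
    | none => bScan (rem.drop 1)
termination_by rem.length
decreasing_by
  · have hmem := List.mem_of_find?_eq_some hm
    have := tokensB_pos _ hmem
    simp only [List.length_drop]
    omega
  · simp only [List.length_drop]
    omega

def split_compound_token_py_alt (raw : String) : List String :=
  let normalized := normalizeTok raw
  let parts := bScan normalized
  if PySem.Chars.join [] (parts.map String.toList) = normalized then parts else []

-- ===== PRECONDITION & SPEC =====
def Spec_split_compound_token_py (raw : String) (out : List String) : Prop := out = split_compound_token_py_alt raw
instance (raw : String) (out : List String) : Decidable (Spec_split_compound_token_py raw out) := by unfold Spec_split_compound_token_py; infer_instance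

-- ===== CLAIM (what is proved, stated in full; the proofs are below) =====
def Claim_equal_split_compound_token_py : Prop := ∀ (raw : String), Dom_split_compound_token_py raw → Spec_split_compound_token_py raw (split_compound_token_py raw)

-- ===== LEMMAS AND PROOFS =====
theorem cand_eq : candidatesA = tokensB := by
  have h : candidatesA = ["ung", "ae", "el", "fu", "ga", "ha", "ka", "ki", "na", "ot", "ru", "wu"] := by
    simp [candidatesA, asterKeys, PySem.List.sorted2, PySem.List.insertBy]
    rfl
  rw [h]; rfl

-- "".join with empty separator distributes over cons
theorem joined_cons (x : List Char) (xs : List (List Char)) :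
    PySem.Chars.join [] (x :: xs) = x ++ PySem.Chars.join [] xs := by
  cases xs with
  | nil => simp [PySem.Chars.join_singleton, PySem.Chars.join_nil]
  | cons y ys => rw [PySem.Chars.join_cons_cons]; simp

-- unfolding equations for bScan
theorem bScan_zero (rem : List Char) (h : rem.length = 0) : bScan rem = [] := by
  rw [bScan, dif_pos h]

theorem bScan_some (rem : List Char) (h : ¬ rem.length = 0) (t : String)
    (hm : tokensB.find? (fun t => PySem.Chars.startswith rem t.toList) = some t) :
    bScan rem = t :: bScan (rem.drop t.toList.length) := by
  rw [bScan, dif_neg h]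
  split
  · next t' hm' => rw [hm] at hm'; cases hm'; rfl
  · next hm' => rw [hm] at hm'; cases hm'

theorem bScan_none (rem : List Char) (h : ¬ rem.length = 0)
    (hm : tokensB.find? (fun t => PySem.Chars.startswith rem t.toList) = none) :
    bScan rem = bScan (rem.drop 1) := by
  rw [bScan, dif_neg h]
  split
  · next t' hm' => rw [hm] at hm'; cases hm'
  · rfl

-- unfolding equations for aLoop (stated against B's find? via cand_eq)
theorem aLoop_zero (rem : List Char) (parts : List String) (h : rem.length = 0) :
    aLoop rem parts = parts := by
  rw [aLoop, dif_pos h]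

theorem aLoop_some (rem : List Char) (parts : List String) (h : ¬ rem.length = 0) (t : String)
    (hm : tokensB.find? (fun t => PySem.Chars.startswith rem t.toList) = some t) :
    aLoop rem parts = aLoop (rem.drop t.toList.length) (parts ++ [t]) := by
  rw [aLoop, dif_neg h]
  rw [show candidatesA.find? (fun c => PySem.Chars.startswith rem c.toList)
        = tokensB.find? (fun c => PySem.Chars.startswith rem c.toList) from by rw [cand_eq]]
  split
  · next hm' => rw [hm] at hm'; cases hm'
  · next t' hm' => rw [hm] at hm'; cases hm'; rfl

theorem aLoop_none (rem : List Char) (parts : List String) (h : ¬ rem.length = 0)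
    (hm : tokensB.find? (fun t => PySem.Chars.startswith rem t.toList) = none) :
    aLoop rem parts = [] := by
  rw [aLoop, dif_neg h]
  rw [show candidatesA.find? (fun c => PySem.Chars.startswith rem c.toList)
        = tokensB.find? (fun c => PySem.Chars.startswith rem c.toList) from by rw [cand_eq]]
  split
  · rfl
  · next t' hm' => rw [hm] at hm'; cases hm'

-- a found token is a prefix of the scanned suffix
theorem found_prefix (rem : List Char) (t : String)
    (hm : tokensB.find? (fun t => PySem.Chars.startswith rem t.toList) = some t) :
    t.toList <+: rem := by
  have hp := List.find?_some hm
  simp only [] at hp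
  exact (PySem.Chars.startswith_iff rem t.toList).mp hp

-- the joined B-scan output never exceeds the scanned suffix in length
theorem bScan_len (rem : List Char) :
    (PySem.Chars.join [] ((bScan rem).map String.toList)).length ≤ rem.length := by
  induction rem using bScan.induct with
  | case1 rem h =>
      rw [bScan_zero rem h]
      simp [PySem.Chars.join_nil]
  | case2 rem h t hm ih =>
      rw [bScan_some rem h t hm]
      have hle := (found_prefix rem t hm).length_le
      rw [List.map_cons, joined_cons]
      simp only [List.length_append, List.length_drop] at *
      omega
  | case3 rem h hm ih =>
      rw [bScan_none rem h hm]
      simp only [List.length_drop] at ih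
      omega

-- when the joined scan output reproduces the suffix, A's loop returns parts ++ bScan rem
theorem aLoop_of_eq (rem : List Char)
    (heq : PySem.Chars.join [] ((bScan rem).map String.toList) = rem) :
    ∀ parts, aLoop rem parts = parts ++ bScan rem := by
  induction rem using bScan.induct with
  | case1 rem h =>
      intro parts
      rw [aLoop_zero rem parts h, bScan_zero rem h]
      simp
  | case2 rem h t hm ih =>
      intro parts
      rw [bScan_some rem h t hm] at heq ⊢
      rw [aLoop_some rem parts h t hm]
      have hrem : t.toList ++ rem.drop t.toList.length = rem := by
        obtain ⟨suf, hsuf⟩ := found_prefix rem t hm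
        subst hsuf; simp
      have heq' : PySem.Chars.join [] ((bScan (rem.drop t.toList.length)).map String.toList)
          = rem.drop t.toList.length := by
        rw [List.map_cons, joined_cons] at heq
        exact List.append_cancel_left (heq.trans hrem.symm)
      rw [ih heq' (parts ++ [t])]
      simp
  | case3 rem h hm ih =>
      exfalso
      rw [bScan_none rem h hm] at heq
      have hlen := bScan_len (rem.drop 1)
      rw [heq] at hlen
      simp only [List.length_drop] at hlen
      omega

-- when it does not, A's loop fails with []
theorem aLoop_of_ne (rem : List Char)
    (hne : PySem.Chars.join [] ((bScan rem).map String.toList) ≠ rem) :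
    ∀ parts, aLoop rem parts = [] := by
  induction rem using bScan.induct with
  | case1 rem h =>
      exfalso
      apply hne
      rw [bScan_zero rem h]
      have : rem = [] := List.length_eq_zero_iff.mp h
      simp [this, PySem.Chars.join_nil]
  | case2 rem h t hm ih =>
      intro parts
      rw [bScan_some rem h t hm] at hne
      rw [aLoop_some rem parts h t hm]
      have hrem : t.toList ++ rem.drop t.toList.length = rem := by
        obtain ⟨suf, hsuf⟩ := found_prefix rem t hm
        subst hsuf; simp
      have hne' : PySem.Chars.join [] ((bScan (rem.drop t.toList.length)).map String.toList)
          ≠ rem.drop t.toList.length := by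
        intro hcontra
        apply hne
        rw [List.map_cons, joined_cons, hcontra, hrem]
      exact ih hne' (parts ++ [t])
  | case3 rem h hm ih =>
      intro parts
      exact aLoop_none rem parts h hm

-- ===== VERDICT (by name: the statement is the Claim_ definition above) =====
theorem split_compound_token_py_spec : Claim_equal_split_compound_token_py := by
  intro raw _
  unfold Spec_split_compound_token_py
  simp only [split_compound_token_py, split_compound_token_py_alt]
  generalize normalizeTok raw = n
  by_cases h0 : n.length = 0
  · have hnil : n = [] := List.length_eq_zero_iff.mp h0
    subst hnil
    rw [if_pos h0, bScan_zero [] rfl]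
    simp [PySem.Chars.join_nil]
  · rw [if_neg h0]
    by_cases heq : PySem.Chars.join [] ((bScan n).map String.toList) = n
    · rw [aLoop_of_eq n heq [], if_pos heq]
      simp
    · rw [aLoop_of_ne n heq [], if_neg heq]
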